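-- pv_equiv track=rewrite | github.com/jimit105/leetcode-submissions | 3491-find-the-maximum-length-of-valid-subsequence-ii/solution.py | maximumLength
-- ===== SOURCE A (Python) =====
-- from typing import List
--
-- def maximumLength(nums: List[int], k: int) -> int:
--     dp = [[0] * k for _ in range(k)] # dp[i][j] represents the length of sequence ending with remainder j where the previous remainder was i
--     res = 0
--
--     for num in nums:
--         num %= k
--         for prev in range(k):
--             dp[prev][num] = dp[num][prev] + 1
--             res = max(res, dp[prev][num])
--     return res
-- ===== SOURCE B (Python) =====
-- from typing import List
--
-- def maximumLength(nums: List[int], k: int) -> int: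
--     # Fix the adjacent-sum target t explicitly: one fresh 1D DP per target.
--     res = 0
--     for t in range(k):
--         dp = [0] * k
--         for num in nums:
--             r = num % k
--             dp[r] = dp[(t - r) % k] + 1
--             res = max(res, dp[r])
--     return res
-- ===== Notes on version B (the rewrite author's own statement) =====
-- stated objective: alternative
-- what changed: B fixes each possible adjacent-sum target t in range(k) explicitly and rescans nums once per target with a fresh 1D dp of size k (dp[r]=dp[(t-r)%k]+1), instead of A's single pass that collapses all targets into one symmetric 2D table via dp[prev][num]=dp[num][prev]+1.
import Mathlib
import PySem

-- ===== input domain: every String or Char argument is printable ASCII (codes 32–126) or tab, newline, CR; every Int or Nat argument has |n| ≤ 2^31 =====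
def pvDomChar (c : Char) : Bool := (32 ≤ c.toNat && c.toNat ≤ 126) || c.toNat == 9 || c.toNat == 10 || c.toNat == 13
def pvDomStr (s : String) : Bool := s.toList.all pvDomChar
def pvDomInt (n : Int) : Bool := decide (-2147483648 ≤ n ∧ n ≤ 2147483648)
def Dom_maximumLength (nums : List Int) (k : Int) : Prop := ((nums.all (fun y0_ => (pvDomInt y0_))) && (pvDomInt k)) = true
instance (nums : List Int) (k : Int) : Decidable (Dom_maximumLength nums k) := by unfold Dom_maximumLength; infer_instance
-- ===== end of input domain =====

-- B re-implements A by fixing each adjacent-sum target t in range(k) and rescanning nums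
-- with a fresh 1D dp per target, instead of A's single pass over a symmetric 2D table.

-- ===== PORT A =====
-- indices passed to pyGetD/pySetD are the loop variable prev ∈ range(k) and num % k, both in [0, k) whenever the loops run
def maximumLength (nums : List Int) (k : Int) : Int :=
  let dp0 : List (List Int) := (PySem.List.pyRange 0 k 1).map (fun _ => List.replicate k.toNat (0 : Int))
  (nums.foldl (fun (st : List (List Int) × Int) num =>
      let num := PySem.Int.mod num k
      (PySem.List.pyRange 0 k 1).foldl (fun (st : List (List Int) × Int) prev =>
          let v := PySem.List.pyGetD (PySem.List.pyGetD st.1 num []) prev 0 + 1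
          (PySem.List.pySetD st.1 prev (PySem.List.pySetD (PySem.List.pyGetD st.1 prev []) num v),
           max st.2 v)) st)
    (dp0, 0)).2

-- ===== PORT B =====
def maximumLength_alt (nums : List Int) (k : Int) : Int :=
  (PySem.List.pyRange 0 k 1).foldl (fun res t =>
      (nums.foldl (fun (st : List Int × Int) num =>
          let r := PySem.Int.mod num k
          let v := PySem.List.pyGetD st.1 (PySem.Int.mod (t - r) k) 0 + 1
          (PySem.List.pySetD st.1 r v, max st.2 v))
        (List.replicate k.toNat (0 : Int), res)).2)
    0

-- ===== PRECONDITION & SPEC =====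
-- Pre_ excludes only k = 0 with non-empty nums, where Python A raises ZeroDivisionError at 'num %= k'.
def Pre_maximumLength (nums : List Int) (k : Int) : Prop := k ≠ 0 ∨ nums = []
instance (nums : List Int) (k : Int) : Decidable (Pre_maximumLength nums k) := by unfold Pre_maximumLength; infer_instance
def pvWitness_maximumLength : List Int × Int := ([1, 2, 3, 4, 5], 3)

def Spec_maximumLength (nums : List Int) (k : Int) (out : Int) : Prop := out = maximumLength_alt nums k
instance (nums : List Int) (k : Int) (out : Int) : Decidable (Spec_maximumLength nums k out) := by unfold Spec_maximumLength; infer_instance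

-- ===== CLAIM (what is proved, stated in full; the proofs are below) =====
def Claim_equal_maximumLength : Prop := ∀ (nums : List Int) (k : Int), Dom_maximumLength nums k → Pre_maximumLength nums k → Spec_maximumLength nums k (maximumLength nums k)

-- ===== LEMMAS AND PROOFS =====

def pvBstep (k t : Int) (dp : List Int) (num : Int) : List Int :=
  PySem.List.pySetD dp (PySem.Int.mod num k)
    (PySem.List.pyGetD dp (PySem.Int.mod (t - PySem.Int.mod num k) k) 0 + 1)

def pvBdp (k t : Int) (l : List Int) : List Int :=
  l.foldl (pvBstep k t) (List.replicate k.toNat (0 : Int))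

def pvBvals (k t : Int) (dp : List Int) : List Int → List Int
  | [] => []
  | num :: l =>
      (PySem.List.pyGetD dp (PySem.Int.mod (t - PySem.Int.mod num k) k) 0 + 1)
        :: pvBvals k t (pvBstep k t dp num) l

-- general helpers
theorem pvGetD_set_eq {α : Type} (xs : List α) (n : Nat) (v : α) (d : α) (h : n < xs.length) :
    (xs.set n v).getD n d = v := by
  simp [List.getD_eq_getElem?_getD, h]

theorem pvGetD_set_ne {α : Type} (xs : List α) (n m : Nat) (v : α) (d : α) (h : m ≠ n) :
    (xs.set n v).getD m d = xs.getD m d := by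
  simp [List.getD_eq_getElem?_getD, Ne.symm h]

theorem pvPyGetD_nonneg {α : Type} (xs : List α) (i : Int) (d : α) (h : 0 ≤ i) :
    PySem.List.pyGetD xs i d = xs.getD i.toNat d := by
  conv_lhs => rw [← Int.toNat_of_nonneg h, PySem.List.pyGetD_natCast]

theorem pvFoldlMax_le (L : List Int) (init c : Int) (h0 : init ≤ c) (h : ∀ x ∈ L, x ≤ c) :
    List.foldl max init L ≤ c := by
  rcases PySem.List.foldl_max_mem L init with h1 | h1
  · omega
  · exact h _ h1

theorem pvFoldlMax_flatten (L : List Int) (F : Int → List Int) (init : Int) :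
    L.foldl (fun res t => List.foldl max res (F t)) init = List.foldl max init (L.flatMap F) := by
  induction L generalizing init with
  | nil => simp
  | cons t L ih => simp [List.foldl_append, ih]

-- mod helpers (0 < k)
theorem pvMod_small (k x : Int) (hk : 0 < k) (h0 : 0 ≤ x) (h1 : x < k) : PySem.Int.mod x k = x := by
  rw [PySem.Int.mod_eq_emod_of_pos hk]; exact Int.emod_eq_of_lt h0 h1

theorem pvMod_add_left (k a b : Int) (hk : 0 < k) :
    PySem.Int.mod (PySem.Int.mod a k + b) k = PySem.Int.mod (a + b) k := by
  simp [PySem.Int.mod_eq_emod_of_pos hk, Int.add_emod, Int.emod_emod_of_dvd]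

theorem pvMod_add_right (k a b : Int) (hk : 0 < k) :
    PySem.Int.mod (a + PySem.Int.mod b k) k = PySem.Int.mod (a + b) k := by
  simp [PySem.Int.mod_eq_emod_of_pos hk, Int.add_emod, Int.emod_emod_of_dvd]

theorem pvMod_sub_left (k a b : Int) (hk : 0 < k) :
    PySem.Int.mod (PySem.Int.mod a k - b) k = PySem.Int.mod (a - b) k := by
  simp [PySem.Int.mod_eq_emod_of_pos hk, Int.sub_emod, Int.emod_emod_of_dvd]

theorem pvMod_sub_right (k a b : Int) (hk : 0 < k) :
    PySem.Int.mod (a - PySem.Int.mod b k) k = PySem.Int.mod (a - b) k := by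
  simp [PySem.Int.mod_eq_emod_of_pos hk, Int.sub_emod, Int.emod_emod_of_dvd]

-- lengths
theorem pvLen_pvBstep (k t : Int) (dp : List Int) (num : Int) :
    (pvBstep k t dp num).length = dp.length := by
  simp [pvBstep, PySem.List.length_pySetD]

theorem pvLen_foldl_pvBstep (k t : Int) (l : List Int) (dp : List Int) :
    (l.foldl (pvBstep k t) dp).length = dp.length := by
  induction l generalizing dp with
  | nil => rfl
  | cons n l ih => rw [List.foldl_cons, ih, pvLen_pvBstep]

theorem pvLen_pvBdp (k t : Int) (l : List Int) : (pvBdp k t l).length = k.toNat := by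
  rw [pvBdp, pvLen_foldl_pvBstep]; simp

-- B inner fold characterization
theorem pvB_inner (k t : Int) (l : List Int) :
    ∀ (dp : List Int) (res : Int),
    l.foldl (fun (st : List Int × Int) num =>
        let r := PySem.Int.mod num k
        let v := PySem.List.pyGetD st.1 (PySem.Int.mod (t - r) k) 0 + 1
        (PySem.List.pySetD st.1 r v, max st.2 v)) (dp, res)
      = (l.foldl (pvBstep k t) dp, List.foldl max res (pvBvals k t dp l)) := by
  induction l with
  | nil => intro dp res; rfl
  | cons n l ih => intro dp res; simp only [List.foldl_cons, pvBvals, List.foldl_cons]; exact ih _ _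

-- B port = foldl max 0 of the flattened value grid
theorem pvAlt_eq (nums : List Int) (k : Int) :
    maximumLength_alt nums k
      = List.foldl max 0 ((PySem.List.pyRange 0 k 1).flatMap
          (fun t => pvBvals k t (List.replicate k.toNat 0) nums)) := by
  rw [← pvFoldlMax_flatten]
  unfold maximumLength_alt
  congr 1
  funext res t
  rw [pvB_inner]

theorem pvBdp_append (k t : Int) (l : List Int) (n : Int) :
    pvBdp k t (l ++ [n]) = pvBstep k t (pvBdp k t l) n := by
  simp [pvBdp, List.foldl_append]

theorem pvMem_pvBvals (k t : Int) (l : List Int) :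
    ∀ (dp : List Int) (x : Int), x ∈ pvBvals k t dp l →
      ∃ l1 n l2, l = l1 ++ n :: l2 ∧
        x = PySem.List.pyGetD (l1.foldl (pvBstep k t) dp)
              (PySem.Int.mod (t - PySem.Int.mod n k) k) 0 + 1 := by
  induction l with
  | nil => intro dp x h; simp [pvBvals] at h
  | cons num l ih =>
      intro dp x h
      simp only [pvBvals, List.mem_cons] at h
      rcases h with h | h
      · exact ⟨[], num, l, rfl, by simp [h]⟩
      · rcases ih _ _ h with ⟨l1, n, l2, rfl, hx⟩
        exact ⟨num :: l1, n, l2, rfl, by simpa using hx⟩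

theorem pvBvals_mem (k t : Int) (l1 : List Int) :
    ∀ (dp : List Int) (n : Int) (l2 : List Int),
      PySem.List.pyGetD (l1.foldl (pvBstep k t) dp)
          (PySem.Int.mod (t - PySem.Int.mod n k) k) 0 + 1 ∈ pvBvals k t dp (l1 ++ n :: l2) := by
  induction l1 with
  | nil => intro dp n l2; simp [pvBvals]
  | cons num l1 ih =>
      intro dp n l2
      simpa [pvBvals] using Or.inr (ih (pvBstep k t dp num) n l2)

def pvGridA (k : Int) (l0 : List Int) : List Int → List Int
  | [] => []
  | num :: l =>
      (PySem.List.pyRange 0 k 1).map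
          (fun p => (pvBdp k (PySem.Int.mod (num + p) k) l0).getD p.toNat 0 + 1)
        ++ pvGridA k (l0 ++ [num]) l

def pvTb (k : Int) (l0 : List Int) (x y : Nat) : Int :=
  (pvBdp k (PySem.Int.mod ((x : Int) + (y : Int)) k) l0).getD y 0

theorem pvMem_pvGridA (k : Int) (l : List Int) :
    ∀ (l0 : List Int) (x : Int), x ∈ pvGridA k l0 l →
      ∃ l1 n l2 p, l = l1 ++ n :: l2 ∧ p ∈ PySem.List.pyRange 0 k 1 ∧
        x = (pvBdp k (PySem.Int.mod (n + p) k) (l0 ++ l1)).getD p.toNat 0 + 1 := by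
  induction l with
  | nil => intro l0 x h; simp [pvGridA] at h
  | cons num l ih =>
      intro l0 x h
      simp only [pvGridA, List.mem_append, List.mem_map] at h
      rcases h with ⟨p, hp, hx⟩ | h
      · exact ⟨[], num, l, p, rfl, hp, by simp [hx.symm]⟩
      · rcases ih _ _ h with ⟨l1, n, l2, p, rfl, hp, hx⟩
        exact ⟨num :: l1, n, l2, p, rfl, hp, by simpa using hx⟩

theorem pvGridA_mem (k : Int) (l1 : List Int) :
    ∀ (l0 : List Int) (n : Int) (l2 : List Int) (p : Int), p ∈ PySem.List.pyRange 0 k 1 →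
      (pvBdp k (PySem.Int.mod (n + p) k) (l0 ++ l1)).getD p.toNat 0 + 1
        ∈ pvGridA k l0 (l1 ++ n :: l2) := by
  induction l1 with
  | nil =>
      intro l0 n l2 p hp
      simp only [List.nil_append, List.append_nil, pvGridA, List.mem_append, List.mem_map]
      exact Or.inl ⟨p, hp, rfl⟩
  | cons num l1 ih =>
      intro l0 n l2 p hp
      simp only [List.cons_append, pvGridA, List.mem_append]
      exact Or.inr (by simpa using ih (l0 ++ [num]) n l2 p hp)

theorem pvInner (k : Int) (hk : 0 < k) (rI : Int) (hr0 : 0 ≤ rI) (hrk : rI < k)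
    (old : Nat → Nat → Int) :
    ∀ (n : Nat) (a : Int), 0 ≤ a → a + n = k → ∀ (cur : List (List Int)) (res : Int),
    cur.length = k.toNat →
    (∀ x, x < k.toNat → (cur.getD x []).length = k.toNat) →
    (∀ x y, x < k.toNat → y < k.toNat →
      (cur.getD x []).getD y 0
        = if y = rI.toNat ∧ (x : Int) < a then old rI.toNat x + 1 else old x y) →
    ∃ dp',
      (PySem.List.pyRange a k 1).foldl
        (fun (st : List (List Int) × Int) prev =>
          let v := PySem.List.pyGetD (PySem.List.pyGetD st.1 rI []) prev 0 + 1
          (PySem.List.pySetD st.1 prev (PySem.List.pySetD (PySem.List.pyGetD st.1 prev []) rI v),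
           max st.2 v)) (cur, res)
        = (dp', List.foldl max res
            ((PySem.List.pyRange a k 1).map (fun p => old rI.toNat p.toNat + 1)))
      ∧ dp'.length = k.toNat
      ∧ (∀ x, x < k.toNat → (dp'.getD x []).length = k.toNat)
      ∧ (∀ x y, x < k.toNat → y < k.toNat →
          (dp'.getD x []).getD y 0 = if y = rI.toNat then old rI.toNat x + 1 else old x y) := by
  intro n
  induction n with
  | zero =>
      intro a ha0 hak cur res hlen hrows hinv
      have hka : k ≤ a := by omega
      rw [PySem.List.pyRange_one_eq_nil hka]
      refine ⟨cur, by simp, hlen, hrows, ?_⟩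
      intro x y hx hy
      have := hinv x y hx hy
      rw [this]
      have hxa : (x : Int) < a := by omega
      by_cases hyr : y = rI.toNat <;> simp [hyr, hxa]
  | succ n ih =>
      intro a ha0 hak cur res hlen hrows hinv
      have hak' : a < k := by omega
      rw [PySem.List.pyRange_one_cons hak', List.foldl_cons, List.map_cons]
      have haK : a.toNat < k.toNat := by omega
      have hrK : rI.toNat < k.toNat := by omega
      -- the value read
      have hread : PySem.List.pyGetD (PySem.List.pyGetD cur rI []) a 0
          = old rI.toNat a.toNat := by
        rw [pvPyGetD_nonneg _ _ _ hr0, pvPyGetD_nonneg _ _ _ ha0,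
            hinv rI.toNat a.toNat hrK haK]
        split_ifs with h
        · exfalso; omega
        · rfl
      set v : Int := PySem.List.pyGetD (PySem.List.pyGetD cur rI []) a 0 + 1 with hv
      set row : List Int := (cur.getD a.toNat []).set rI.toNat v with hrow
      have hwrite : PySem.List.pySetD cur a
            (PySem.List.pySetD (PySem.List.pyGetD cur a []) rI v)
          = cur.set a.toNat row := by
        rw [pvPyGetD_nonneg _ _ _ ha0, PySem.List.pySetD_of_nonneg _ _ hr0,
            PySem.List.pySetD_of_nonneg _ _ ha0]
      -- invariants for the updated table
      have hlen' : (cur.set a.toNat row).length = k.toNat := by simp [hlen]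
      have hrlen : (cur.getD a.toNat []).length = k.toNat := hrows _ haK
      have hrows' : ∀ x, x < k.toNat → ((cur.set a.toNat row).getD x []).length = k.toNat := by
        intro x hx
        by_cases hxa : x = a.toNat
        · subst hxa
          rw [pvGetD_set_eq _ _ _ _ (by omega : a.toNat < cur.length), hrow,
              List.length_set]
          exact hrlen
        · rw [pvGetD_set_ne _ _ _ _ _ hxa]; exact hrows x hx
      have hinv' : ∀ x y, x < k.toNat → y < k.toNat →
          ((cur.set a.toNat row).getD x []).getD y 0
            = if y = rI.toNat ∧ (x : Int) < a + 1 then old rI.toNat x + 1 else old x y := by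
        intro x y hx hy
        by_cases hxa : x = a.toNat
        · subst hxa
          rw [pvGetD_set_eq _ _ _ _ (by omega : a.toNat < cur.length), hrow]
          by_cases hyr : y = rI.toNat
          · subst hyr
            have hcond : ((a.toNat : Int) < a + 1) := by omega
            rw [pvGetD_set_eq _ _ _ _ (by omega), if_pos ⟨rfl, hcond⟩, hv, hread]
          · rw [pvGetD_set_ne _ _ _ _ _ hyr, hinv _ y hx hy]
            simp [hyr]
        · rw [pvGetD_set_ne _ _ _ _ _ hxa, hinv x y hx hy]
          have : ((x : Int) < a) ↔ ((x : Int) < a + 1) := by omega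
          simp [this]
      have hstep : a + 1 + (n : Int) = k := by push_cast at hak ⊢; omega
      rcases ih (a + 1) (by omega) hstep (cur.set a.toNat row) (max res v) hlen' hrows' hinv'
        with ⟨dp', heq, h1, h2, h3⟩
      refine ⟨dp', ?_, h1, h2, h3⟩
      simp only [hwrite]
      rw [heq, List.foldl_cons]
      congr 2
      rw [hv, hread]

theorem pvCouple_step (k : Int) (hk : 0 < k) (l1 : List Int) (num : Int) (x y : Nat)
    (hx : x < k.toNat) (hy : y < k.toNat) :
    (if y = (PySem.Int.mod num k).toNat
        then pvTb k l1 (PySem.Int.mod num k).toNat x + 1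
        else pvTb k l1 x y)
      = pvTb k (l1 ++ [num]) x y := by
  have hm0 : 0 ≤ PySem.Int.mod num k := PySem.Int.mod_nonneg num hk
  have hmc : ((PySem.Int.mod num k).toNat : Int) = PySem.Int.mod num k := Int.toNat_of_nonneg hm0
  have hset : pvTb k (l1 ++ [num]) x y
      = ((pvBdp k (PySem.Int.mod ((x : Int) + (y : Int)) k) l1).set (PySem.Int.mod num k).toNat
          (PySem.List.pyGetD (pvBdp k (PySem.Int.mod ((x : Int) + (y : Int)) k) l1)
            (PySem.Int.mod (PySem.Int.mod ((x : Int) + (y : Int)) k - PySem.Int.mod num k) k)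
            0 + 1)).getD y 0 := by
    rw [pvTb, pvBdp_append, pvBstep, PySem.List.pySetD_of_nonneg _ _ hm0]
  rw [hset]
  by_cases hyr : y = (PySem.Int.mod num k).toNat
  · subst hyr
    rw [if_pos rfl, pvGetD_set_eq _ _ _ _ (by rw [pvLen_pvBdp]; omega)]
    have hidx : PySem.Int.mod
        (PySem.Int.mod ((x : Int) + ((PySem.Int.mod num k).toNat : Int)) k
          - PySem.Int.mod num k) k = (x : Int) := by
      rw [pvMod_sub_left _ _ _ hk, hmc]
      have harg : (x : Int) + PySem.Int.mod num k - PySem.Int.mod num k = (x : Int) := by ring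
      rw [harg, pvMod_small _ _ hk (by omega) (by omega)]
    rw [hidx, pvPyGetD_nonneg _ _ _ (by omega), pvTb, Int.add_comm ((PySem.Int.mod num k).toNat : Int) (x : Int)]
    simp
  · rw [if_neg hyr, pvGetD_set_ne _ _ _ _ _ hyr]
    rfl

theorem pvOuter (k : Int) (hk : 0 < k) (l2 : List Int) :
    ∀ (l1 : List Int) (cur : List (List Int)) (res : Int),
    cur.length = k.toNat →
    (∀ x, x < k.toNat → (cur.getD x []).length = k.toNat) →
    (∀ x y, x < k.toNat → y < k.toNat → (cur.getD x []).getD y 0 = pvTb k l1 x y) →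
    (l2.foldl (fun (st : List (List Int) × Int) num =>
        let num := PySem.Int.mod num k
        (PySem.List.pyRange 0 k 1).foldl (fun (st : List (List Int) × Int) prev =>
            let v := PySem.List.pyGetD (PySem.List.pyGetD st.1 num []) prev 0 + 1
            (PySem.List.pySetD st.1 prev
               (PySem.List.pySetD (PySem.List.pyGetD st.1 prev []) num v),
             max st.2 v)) st) (cur, res)).2
      = List.foldl max res (pvGridA k l1 l2) := by
  induction l2 with
  | nil => intro l1 cur res _ _ _; simp [pvGridA]
  | cons num l2 ih =>
      intro l1 cur res hlen hrows hcpl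
      have hm0 : 0 ≤ PySem.Int.mod num k := PySem.Int.mod_nonneg num hk
      have hmk : PySem.Int.mod num k < k := PySem.Int.mod_lt num hk
      have hkk : (0 : Int) + (k.toNat : Int) = k := by omega
      rcases pvInner k hk (PySem.Int.mod num k) hm0 hmk (pvTb k l1) k.toNat 0 le_rfl hkk
          cur res hlen hrows
          (by intro x y hx hy; rw [hcpl x y hx hy]; simp) with ⟨dp', heq, h1, h2, h3⟩
      rw [List.foldl_cons]
      simp only [heq]
      rw [ih (l1 ++ [num]) dp' _ h1 h2
            (by intro x y hx hy
                rw [h3 x y hx hy]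
                exact pvCouple_step k hk l1 num x y hx hy)]
      rw [pvGridA, List.foldl_append]
      congr 2
      apply List.map_congr_left
      intro p hp
      rw [PySem.List.mem_pyRange_one] at hp
      rw [pvTb]
      have hpc : ((p.toNat : Int)) = p := Int.toNat_of_nonneg hp.1
      rw [hpc, Int.toNat_of_nonneg hm0, pvMod_add_left _ _ _ hk]

theorem pvA_eq (nums : List Int) (k : Int) (hk : 0 < k) :
    maximumLength nums k = List.foldl max 0 (pvGridA k [] nums) := by
  have hdp0 : ∀ x, x < k.toNat →
      ((PySem.List.pyRange 0 k 1).map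
        (fun _ => List.replicate k.toNat (0 : Int))).getD x [] = List.replicate k.toNat 0 := by
    intro x hx
    have hxlen : x < (PySem.List.pyRange 0 k 1).length := by
      rw [PySem.List.length_pyRange_one]; omega
    rw [List.getD_eq_getElem?_getD, List.getElem?_map, List.getElem?_eq_getElem hxlen]
    rfl
  unfold maximumLength
  refine pvOuter k hk nums [] _ 0 ?_ ?_ ?_
  · rw [List.length_map, PySem.List.length_pyRange_one]; omega
  · intro x hx; rw [hdp0 x hx, List.length_replicate]
  · intro x y hx hy
    rw [hdp0 x hx]
    simp [pvTb, pvBdp, List.getD_eq_getElem?_getD, hy]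

theorem pvMain_pos (nums : List Int) (k : Int) (hk : 0 < k) :
    maximumLength nums k = maximumLength_alt nums k := by
  rw [pvA_eq nums k hk, pvAlt_eq]
  apply le_antisymm
  · refine pvFoldlMax_le _ _ _ (PySem.List.le_foldl_max _ 0).1 ?_
    intro x hxA
    rcases pvMem_pvGridA k nums [] x hxA with ⟨l1, n, l2, p, hsplit, hp, hxv⟩
    rw [PySem.List.mem_pyRange_one] at hp
    refine (PySem.List.le_foldl_max _ 0).2 _ (List.mem_flatMap.2
      ⟨PySem.Int.mod (n + p) k, ?_, ?_⟩)
    · rw [PySem.List.mem_pyRange_one]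
      exact ⟨PySem.Int.mod_nonneg _ hk, PySem.Int.mod_lt _ hk⟩
    · rw [hsplit]
      have hval := pvBvals_mem k (PySem.Int.mod (n + p) k) l1
        (List.replicate k.toNat 0) n l2
      have hidx : PySem.Int.mod (PySem.Int.mod (n + p) k - PySem.Int.mod n k) k = p := by
        rw [pvMod_sub_right _ _ _ hk, pvMod_sub_left _ _ _ hk]
        have : n + p - n = p := by ring
        rw [this, pvMod_small _ _ hk hp.1 hp.2]
      rw [hidx] at hval
      have hx' : x = PySem.List.pyGetD (l1.foldl (pvBstep k (PySem.Int.mod (n + p) k))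
          (List.replicate k.toNat 0)) p 0 + 1 := by
        rw [hxv, pvPyGetD_nonneg _ _ _ hp.1]
        rfl
      rw [hx']
      exact hval
  · refine pvFoldlMax_le _ _ _ (PySem.List.le_foldl_max _ 0).1 ?_
    intro x hxB
    rcases List.mem_flatMap.1 hxB with ⟨t, ht, hxv⟩
    rw [PySem.List.mem_pyRange_one] at ht
    rcases pvMem_pvBvals k t nums _ x hxv with ⟨l1, n, l2, hsplit, hx'⟩
    have hp0 : 0 ≤ PySem.Int.mod (t - PySem.Int.mod n k) k := PySem.Int.mod_nonneg _ hk
    have hpk : PySem.Int.mod (t - PySem.Int.mod n k) k < k := PySem.Int.mod_lt _ hk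
    apply (PySem.List.le_foldl_max _ 0).2
    have htarg : PySem.Int.mod (n + PySem.Int.mod (t - PySem.Int.mod n k) k) k = t := by
      rw [pvMod_sub_right _ _ _ hk, pvMod_add_right _ _ _ hk]
      have : n + (t - n) = t := by ring
      rw [this, pvMod_small _ _ hk ht.1 ht.2]
    have hmem := pvGridA_mem k l1 [] n l2 (PySem.Int.mod (t - PySem.Int.mod n k) k)
      (by rw [PySem.List.mem_pyRange_one]; exact ⟨hp0, hpk⟩)
    rw [htarg, List.nil_append] at hmem
    have hx'' : x = (pvBdp k t l1).getD (PySem.Int.mod (t - PySem.Int.mod n k) k).toNat 0 + 1 := by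
      rw [hx', pvPyGetD_nonneg _ _ _ hp0]
      rfl
    rw [← hsplit, ← hx''] at hmem
    exact hmem

theorem pvMain_nonpos (nums : List Int) (k : Int) (hk : k ≤ 0) :
    maximumLength nums k = maximumLength_alt nums k := by
  have hnil : PySem.List.pyRange 0 k 1 = [] := PySem.List.pyRange_one_eq_nil hk
  unfold maximumLength maximumLength_alt
  rw [hnil]
  simp

-- ===== VERDICT (by name: the statement is the Claim_ definition above) =====
theorem maximumLength_spec : Claim_equal_maximumLength := by
  intro nums k _ _
  unfold Spec_maximumLength
  by_cases hk : k ≤ 0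
  · exact pvMain_nonpos nums k hk
  · exact pvMain_pos nums k (by omega)
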